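-- pv_equiv track=rewrite | github.com/pypi-data/pypi-mirror-401 | packages/stanlogic/stanlogic-2.1.0-py3-none-any.whl/stanlogic/BoolMinGeo.py | _bitwise_to_str
-- ===== SOURCE A (Python) =====
-- def _bitwise_to_str(value, mask, bit_width):
--     """
--     Convert bitwise representation (value, mask) to string with '-'.
--
--     Args:
--         value: Integer representing the bit values
--         mask: Integer where 1 = fixed bit, 0 = don't care
--         bit_width: Number of bits
--
--     Returns:
--         str: Binary string with '-' for don't cares
--
--     Example:
--         (value=0b1001, mask=0b1101, width=4) → "10-1"
--     """
--     result = []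
--     for i in range(bit_width):
--         bit_pos = bit_width - 1 - i  # MSB first
--         if mask & (1 << bit_pos):
--             # Bit is fixed
--             if value & (1 << bit_pos):
--                 result.append('1')
--             else:
--                 result.append('0')
--         else:
--             # Don't care
--             result.append('-')
--     return ''.join(result)
-- ===== SOURCE B (Python) =====
-- def _bitwise_to_str(value, mask, bit_width):
--     # Divide and conquer: split the width in half, render the high half on the
--     # shifted-down operands and the low half on the originals, concatenate.
--     if bit_width <= 0:
--         return ''
--     if bit_width == 1:
--         return ('1' if value & 1 else '0') if mask & 1 else '-'
--     h = bit_width // 2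
--     return (_bitwise_to_str(value >> h, mask >> h, bit_width - h)
--             + _bitwise_to_str(value, mask, h))
-- ===== Notes on version B (the rewrite author's own statement) =====
-- stated objective: faster
-- what changed: A is a single MSB-first loop testing bit bit_width-1-i with a fresh 1<<bit_pos mask per iteration; B is a recursive divide-and-conquer that splits the width in half, renders the high half on the operands shifted down by h = bit_width//2, renders the low half on the originals, and concatenates the two halves.
import Mathlib
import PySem

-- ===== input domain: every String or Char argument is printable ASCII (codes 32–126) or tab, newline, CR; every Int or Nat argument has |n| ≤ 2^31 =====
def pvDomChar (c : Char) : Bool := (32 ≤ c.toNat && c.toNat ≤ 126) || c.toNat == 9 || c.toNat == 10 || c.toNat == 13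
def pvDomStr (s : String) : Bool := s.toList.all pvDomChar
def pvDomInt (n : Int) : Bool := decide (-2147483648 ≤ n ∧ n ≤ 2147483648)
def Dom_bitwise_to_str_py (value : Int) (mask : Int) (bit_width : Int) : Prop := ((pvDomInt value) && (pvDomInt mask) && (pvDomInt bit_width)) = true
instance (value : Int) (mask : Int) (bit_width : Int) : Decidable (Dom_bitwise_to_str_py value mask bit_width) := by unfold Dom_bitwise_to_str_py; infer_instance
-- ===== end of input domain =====

-- B replaces A's MSB-first loop (a fresh 1 << bit_pos test per position) by a recursive
-- divide-and-conquer: split the width in half, render the high half on the operands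
-- shifted down by h = bit_width // 2, the low half on the originals, and concatenate.

-- ===== PORT A =====
-- MSB-first loop over range(bit_width); bit_pos = bit_width-1-i ≥ 0 inside the loop, so
-- `.toNat` on the shift amount is exact (Python `1 << bit_pos` with nonnegative bit_pos).
def bitwise_to_str_py (value : Int) (mask : Int) (bit_width : Int) : String :=
  let result : List Char :=
    (PySem.List.pyRange 0 bit_width 1).foldl
      (fun result i =>
        let bit_pos := bit_width - 1 - i
        if PySem.Int.band mask ((1 : Int) <<< bit_pos.toNat) ≠ 0 then
          if PySem.Int.band value ((1 : Int) <<< bit_pos.toNat) ≠ 0 then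
            result ++ ['1']
          else
            result ++ ['0']
        else
          result ++ ['-']) []
  String.mk result

-- ===== PORT B =====
-- divide and conquer on bit_width (Source B); in the recursive branch bit_width ≥ 2, so
-- h = bit_width // 2 ≥ 1 and `.toNat` on the Python shift amount `>> h` is exact.
def bitwise_to_str_py_alt (value : Int) (mask : Int) (bit_width : Int) : String :=
  if bit_width ≤ 0 then ""
  else if bit_width = 1 then
    if PySem.Int.band mask 1 ≠ 0 then
      (if PySem.Int.band value 1 ≠ 0 then "1" else "0")
    else "-"
  else
    let h := PySem.Int.floordiv bit_width 2
    bitwise_to_str_py_alt (value >>> h.toNat) (mask >>> h.toNat) (bit_width - h)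
      ++ bitwise_to_str_py_alt value mask h
termination_by bit_width.toNat
decreasing_by
  · rw [PySem.Int.floordiv_eq_ediv_of_pos (by norm_num)]; omega
  · rw [PySem.Int.floordiv_eq_ediv_of_pos (by norm_num)]; omega

-- ===== PRECONDITION & SPEC =====
def Spec_bitwise_to_str_py (value : Int) (mask : Int) (bit_width : Int) (out : String) : Prop := out = bitwise_to_str_py_alt value mask bit_width
instance (value : Int) (mask : Int) (bit_width : Int) (out : String) : Decidable (Spec_bitwise_to_str_py value mask bit_width out) := by unfold Spec_bitwise_to_str_py; infer_instance

-- ===== CLAIM (what is proved, stated in full; the proofs are below) =====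
def Claim_equal_bitwise_to_str_py : Prop := ∀ (value : Int) (mask : Int) (bit_width : Int), Dom_bitwise_to_str_py value mask bit_width → Spec_bitwise_to_str_py value mask bit_width (bitwise_to_str_py value mask bit_width)

-- ===== LEMMAS AND PROOFS =====

lemma pvToList_mk (a : List Char) : (String.mk a).toList = a := Eq.symm (String.ofList_eq.mp rfl)

lemma pvMk_append (a b : List Char) : String.mk a ++ String.mk b = String.mk (a ++ b) := by
  rw [← String.toList_inj, String.toList_append, pvToList_mk, pvToList_mk, pvToList_mk]

-- iterated Python `// 2` (floor halving)
def pvSh (x : Int) : Nat → Int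
  | 0 => x
  | p + 1 => pvSh (PySem.Int.floordiv x 2) p

-- the character both programs emit for absolute bit position p
def pvChr (value mask : Int) (p : Nat) : Char :=
  if PySem.Int.band mask ((1 : Int) <<< p) ≠ 0 then
    (if PySem.Int.band value ((1 : Int) <<< p) ≠ 0 then '1' else '0')
  else '-'

-- the row of characters for positions n-1, …, 0 (MSB first)
def pvRow (value mask : Int) : Nat → List Char
  | 0 => []
  | n + 1 => pvChr value mask n :: pvRow value mask n

lemma pvFloordiv_cast (a : Nat) : PySem.Int.floordiv (a : Int) 2 = ((a / 2 : Nat) : Int) := by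
  rw [PySem.Int.floordiv_eq_iff_of_pos (by norm_num)]
  constructor <;> push_cast <;> omega

lemma pvFloordiv_neg (y : Nat) :
    PySem.Int.floordiv (-(y : Int) - 1) 2 = -((y / 2 : Nat) : Int) - 1 := by
  rw [PySem.Int.floordiv_eq_iff_of_pos (by norm_num)]
  constructor <;> push_cast <;> omega

lemma pvSh_cast (a : Nat) (p : Nat) : pvSh (a : Int) p = ((a / 2 ^ p : Nat) : Int) := by
  induction p generalizing a with
  | zero => simp [pvSh]
  | succ p ih =>
      rw [pvSh, pvFloordiv_cast, ih]
      congr 1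
      rw [Nat.div_div_eq_div_mul]
      ring_nf

lemma pvSh_neg (y : Nat) (p : Nat) :
    pvSh (-(y : Int) - 1) p = -((y / 2 ^ p : Nat) : Int) - 1 := by
  induction p generalizing y with
  | zero => simp [pvSh]
  | succ p ih =>
      rw [pvSh, pvFloordiv_neg, ih]
      congr 2
      rw [Nat.div_div_eq_div_mul]
      ring_nf

lemma pvMod_cast (a : Nat) : PySem.Int.mod (a : Int) 2 = ((a % 2 : Nat) : Int) := by
  show Int.fmod _ _ = _
  rw [Int.fmod_eq_emod, if_pos (Or.inl (by norm_num))]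
  omega

lemma pvMod_neg (y : Nat) : PySem.Int.mod (-(y : Int) - 1) 2 = 1 - ((y % 2 : Nat) : Int) := by
  show Int.fmod _ _ = _
  rw [Int.fmod_eq_emod, if_pos (Or.inl (by norm_num))]
  omega

lemma pvShiftLeft_one (p : Nat) : ((1 : Int) <<< p) = ((2 ^ p : Nat) : Int) := by
  rw [Int.shiftLeft_eq]
  push_cast
  ring

-- the bridge: testing bit p with a mask equals testing the low bit after p floor halvings
lemma pvBit_iff (x : Int) (p : Nat) :
    (PySem.Int.band x ((1 : Int) <<< p) ≠ 0) ↔ (PySem.Int.mod (pvSh x p) 2 ≠ 0) := by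
  rcases le_or_gt 0 x with hx | hx
  · obtain ⟨a, rfl⟩ : ∃ a : Nat, x = (a : Int) := ⟨x.toNat, by omega⟩
    rw [pvShiftLeft_one, PySem.Int.band_of_nonneg (by positivity) (by positivity),
      pvSh_cast, pvMod_cast]
    simp only [Int.toNat_natCast, Nat.and_two_pow, Nat.testBit_eq_decide_div_mod_eq]
    generalize a / 2 ^ p = q
    by_cases h : q % 2 = 1 <;> simp [h] <;> omega
  · obtain ⟨y, rfl⟩ : ∃ y : Nat, x = -(y : Int) - 1 := ⟨(-x - 1).toNat, by omega⟩
    rw [pvShiftLeft_one, pvSh_neg, pvMod_neg]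
    show (if _ then _ else _) ≠ (0 : Int) ↔ _
    rw [if_neg (by omega), if_pos (by positivity)]
    have : (-(-(y : Int) - 1) - 1).toNat = y := by omega
    rw [this]
    simp only [Int.toNat_natCast, Nat.and_comm (2 ^ p), Nat.and_two_pow,
      Nat.testBit_eq_decide_div_mod_eq]
    generalize y / 2 ^ p = q
    by_cases h : q % 2 = 1 <;> simp [h] <;> omega

-- arithmetic right shift by one is floor halving
lemma pvShiftR_one (x : Int) : x >>> (1 : Nat) = PySem.Int.floordiv x 2 := by
  rw [PySem.Int.floordiv_eq_ediv_of_pos (by norm_num)]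
  rcases le_or_gt 0 x with hx | hx
  · obtain ⟨a, rfl⟩ : ∃ a : Nat, x = (a : Int) := ⟨x.toNat, by omega⟩
    rw [show ((a : Int) >>> (1 : Nat)) = ((a >>> 1 : Nat) : Int) from
        (Int.natCast_shiftRight a 1).symm, Nat.shiftRight_eq_div_pow]
    omega
  · obtain ⟨y, rfl⟩ : ∃ y : Nat, x = Int.negSucc y := ⟨(-x - 1).toNat, by rw [Int.negSucc_eq]; omega⟩
    rw [Int.negSucc_shiftRight, Nat.shiftRight_eq_div_pow, Int.negSucc_eq, Int.negSucc_eq]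
    omega

lemma pvSh_eq_shiftRight (x : Int) (h : Nat) : pvSh x h = x >>> h := by
  induction h generalizing x with
  | zero => simp [pvSh]
  | succ h ih =>
      rw [pvSh, ih, ← pvShiftR_one, ← Int.shiftRight_add, Nat.add_comm]

lemma pvSh_add (x : Int) (a b : Nat) : pvSh x (a + b) = pvSh (pvSh x a) b := by
  induction a generalizing x with
  | zero => simp [pvSh]
  | succ a ih =>
      rw [show a + 1 + b = (a + b) + 1 from by omega, pvSh, pvSh, ih]

-- bit p of a right-shifted operand is absolute bit p + h
lemma pvBand_shift (x : Int) (h p : Nat) :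
    (PySem.Int.band (x >>> h) ((1:Int) <<< p) ≠ 0) ↔
    (PySem.Int.band x ((1:Int) <<< (p + h)) ≠ 0) := by
  rw [pvBit_iff, pvBit_iff, ← pvSh_eq_shiftRight, ← pvSh_add, Nat.add_comm h p]

-- the shifted operands see position p as absolute position p + h
lemma pvChr_shift (v m : Int) (h p : Nat) :
    pvChr (v >>> h) (m >>> h) p = pvChr v m (p + h) := by
  unfold pvChr
  have h1 := pvBand_shift v h p
  have h2 := pvBand_shift m h p
  split_ifs <;> tauto

lemma pvRow_split (v m : Int) (h : Nat) : ∀ k : Nat,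
    pvRow v m (k + h) = pvRow (v >>> h) (m >>> h) k ++ pvRow v m h
  | 0 => by simp [pvRow]
  | k + 1 => by
      rw [show k + 1 + h = (k + h) + 1 from by omega, pvRow, pvRow,
        pvRow_split v m h k, pvChr_shift]
      rfl

-- A's foldl produces the map of pvChr over descending positions
lemma pvA_foldl (value mask bit_width : Int) (l : List Int) (acc : List Char) :
    l.foldl
      (fun result i =>
        let bit_pos := bit_width - 1 - i
        if PySem.Int.band mask ((1 : Int) <<< bit_pos.toNat) ≠ 0 then
          if PySem.Int.band value ((1 : Int) <<< bit_pos.toNat) ≠ 0 then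
            result ++ ['1']
          else
            result ++ ['0']
        else
          result ++ ['-']) acc
    = acc ++ l.map (fun i => pvChr value mask (bit_width - 1 - i).toNat) := by
  induction l generalizing acc with
  | nil => simp
  | cons i l ih =>
      simp only [List.foldl_cons, List.map_cons, ih, pvChr]
      split_ifs <;> simp

lemma pvPyRange (bw : Int) :
    PySem.List.pyRange 0 bw 1 = (List.range bw.toNat).map (fun k : Nat => (k : Int)) := by
  unfold PySem.List.pyRange
  by_cases h : (0 : Int) < bw
  · simp only [if_neg (show ¬ (1 : Int) = 0 by norm_num), if_pos (show (0 : Int) < 1 by norm_num),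
      if_pos h, sub_zero, add_sub_cancel_right, Int.ediv_one, zero_add, one_mul]
  · simp only [if_neg (show ¬ (1 : Int) = 0 by norm_num), if_pos (show (0 : Int) < 1 by norm_num),
      if_neg h]
    have : bw.toNat = 0 := by omega
    simp [this]

lemma pvRow_eq_map (v m : Int) (n : Nat) :
    pvRow v m n = (List.range n).map (fun k => pvChr v m (n - 1 - k)) := by
  induction n with
  | zero => simp [pvRow]
  | succ n ih =>
      rw [pvRow, List.range_succ_eq_map, List.map_cons, List.map_map]
      simp only [Nat.add_sub_cancel, Nat.sub_zero, Function.comp_def]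
      congr 1
      rw [ih]
      apply List.map_congr_left
      intro k hk
      congr 1
      have := List.mem_range.mp hk
      omega

-- B equals the row of characters for positions bit_width-1, …, 0
lemma pvB_eq (n : Nat) : ∀ (v m bw : Int), bw.toNat = n →
    bitwise_to_str_py_alt v m bw = String.mk (pvRow v m n) := by
  induction n using Nat.strong_induction_on with
  | _ n ih =>
    intro v m bw hn
    rw [bitwise_to_str_py_alt]
    by_cases h0 : bw ≤ 0
    · rw [if_pos h0]
      have : n = 0 := by omega
      subst this
      rfl
    · rw [if_neg h0]
      by_cases h1 : bw = 1
      · rw [if_pos h1]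
        have : n = 1 := by omega
        subst this
        simp only [pvRow, pvChr, pvShiftLeft_one, pow_zero, Nat.cast_one]
        split_ifs <;> rfl
      · rw [if_neg h1]
        have hbw2 : 2 ≤ bw := by omega
        have hfd : PySem.Int.floordiv bw 2 = bw / 2 :=
          PySem.Int.floordiv_eq_ediv_of_pos (by norm_num)
        have hlt1 : (PySem.Int.floordiv bw 2).toNat < n := by rw [hfd]; omega
        have hlt2 : (bw - PySem.Int.floordiv bw 2).toNat < n := by rw [hfd]; omega
        show bitwise_to_str_py_alt (v >>> (PySem.Int.floordiv bw 2).toNat)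
              (m >>> (PySem.Int.floordiv bw 2).toNat) (bw - PySem.Int.floordiv bw 2)
            ++ bitwise_to_str_py_alt v m (PySem.Int.floordiv bw 2) = String.mk (pvRow v m n)
        rw [ih _ hlt2 _ _ _ rfl, ih _ hlt1 _ _ _ rfl]
        have hsum : (bw - PySem.Int.floordiv bw 2).toNat + (PySem.Int.floordiv bw 2).toNat = n := by
          rw [hfd] at *; omega
        rw [← hsum, pvRow_split, pvMk_append]

-- ===== VERDICT (by name: the statement is the Claim_ definition above) =====
theorem bitwise_to_str_py_spec : Claim_equal_bitwise_to_str_py := by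
  intro value mask bit_width _
  show bitwise_to_str_py value mask bit_width = bitwise_to_str_py_alt value mask bit_width
  rw [pvB_eq bit_width.toNat value mask bit_width rfl]
  simp only [bitwise_to_str_py, pvA_foldl, pvPyRange, List.nil_append, List.map_map,
    Function.comp_def, pvRow_eq_map]
  congr 1
  apply List.map_congr_left
  intro k hk
  have := List.mem_range.mp hk
  congr 1
  omega
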